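-- pv_equiv track=rewrite | github.com/Peakergzf/competitive-programming | FIT2004 Programming Competition (S2 2018)/R1_B.py | interesting
-- ===== SOURCE A (Python) =====
-- def interesting(n):
--     s = str(n)
--     cnt = [0 for _ in range(10)]
--     for c in s:
--         cnt[int(c)] += 1
--     for i in cnt:
--         if i > 1:
--             return False
--     return True
-- ===== SOURCE B (Python) =====
-- def interesting(n):
--     digits = sorted(int(c) for c in str(n))
--     return all(a != b for a, b in zip(digits, digits[1:]))
-- ===== Notes on version B (the rewrite author's own statement) =====
-- stated objective: alternative
-- what changed: Replaces A's 10-slot count array plus separate duplicate-scan with a sort-then-adjacent-scan: sort the digit list and check that no two neighbouring digits are equal.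
import Mathlib
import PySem

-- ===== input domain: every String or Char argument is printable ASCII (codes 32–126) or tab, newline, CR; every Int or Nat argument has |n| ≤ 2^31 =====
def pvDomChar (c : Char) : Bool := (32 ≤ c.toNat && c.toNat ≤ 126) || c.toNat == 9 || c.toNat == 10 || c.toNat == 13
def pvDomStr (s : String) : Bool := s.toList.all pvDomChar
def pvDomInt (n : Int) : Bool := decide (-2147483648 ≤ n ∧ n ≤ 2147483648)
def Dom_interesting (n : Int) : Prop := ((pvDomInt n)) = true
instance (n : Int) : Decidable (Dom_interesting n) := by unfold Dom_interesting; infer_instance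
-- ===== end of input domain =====

-- B replaces A's 10-slot count array plus duplicate-scan loop with a different
-- algorithm: sort the digit list and check that no two neighbouring digits are
-- equal (objective: alternative).

-- ===== PORT A =====
-- 'for i in cnt: if i > 1: return False' then 'return True'
def interestingScan : List Int → Bool
  | [] => true
  | i :: rest => if 1 < i then false else interestingScan rest

def interesting (n : Int) : Bool :=
  let s := PySem.Int.toChars n
  let cnt : List Int := (PySem.List.pyRange 0 10 1).map (fun _ => 0)
  -- cnt[int(c)] += 1 ; int(c) raises for non-digit chars (n < 0), excluded by Pre_
  let cnt := s.foldl (fun cnt c =>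
      let i := (PySem.Int.ofChars? [c]).getD 0
      PySem.List.pySetD cnt i (PySem.List.pyGetD cnt i 0 + 1)) cnt
  interestingScan cnt

-- ===== PORT B =====
-- digits = sorted(int(c) for c in str(n)); all(a != b for a, b in zip(digits, digits[1:]))
def interesting_alt (n : Int) : Bool :=
  let digits := PySem.List.sorted
      ((PySem.Int.toChars n).map (fun c => (PySem.Int.ofChars? [c]).getD 0))
      (fun x => x) false
  (digits.zip digits.tail).all (fun p => p.1 != p.2)

-- ===== PRECONDITION & SPEC =====
-- Pre_ excludes n < 0, where str(n) starts with '-' and both A and B raise ValueError at int('-').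
def Pre_interesting (n : Int) : Prop := 0 ≤ n
instance (n : Int) : Decidable (Pre_interesting n) := by unfold Pre_interesting; infer_instance
def pvWitness_interesting : Int := 123

def Spec_interesting (n : Int) (out : Bool) : Prop := out = interesting_alt n
instance (n : Int) (out : Bool) : Decidable (Spec_interesting n out) := by unfold Spec_interesting; infer_instance

-- ===== CLAIM (what is proved, stated in full; the proofs are below) =====
def Claim_equal_interesting : Prop := ∀ (n : Int), Dom_interesting n → Pre_interesting n → Spec_interesting n (interesting n)

-- ===== LEMMAS AND PROOFS =====

def pvDigChars : List Char := ['0','1','2','3','4','5','6','7','8','9']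

lemma pv_digitChar_mem (m : Nat) (h : m < 10) : Nat.digitChar m ∈ pvDigChars := by
  interval_cases m <;> decide

lemma pv_toDigitsCore_mem (f : Nat) : ∀ (n : Nat) (l : List Char),
    (∀ x ∈ l, x ∈ pvDigChars) → ∀ c ∈ Nat.toDigitsCore 10 f n l, c ∈ pvDigChars := by
  induction f with
  | zero => intro n l hl c hc; exact hl c hc
  | succ f ih =>
    intro n l hl c hc
    simp only [Nat.toDigitsCore] at hc
    by_cases hx : n / 10 = 0
    · rw [if_pos hx] at hc
      rcases List.mem_cons.mp hc with h | h
      · exact h ▸ pv_digitChar_mem _ (Nat.mod_lt _ (by omega))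
      · exact hl c h
    · rw [if_neg hx] at hc
      refine ih (n / 10) _ ?_ c hc
      intro x hx'
      rcases List.mem_cons.mp hx' with h | h
      · exact h ▸ pv_digitChar_mem _ (Nat.mod_lt _ (by omega))
      · exact hl x h

lemma pv_mem_toChars (n : Int) (hn : 0 ≤ n) :
    ∀ c ∈ PySem.Int.toChars n, c ∈ pvDigChars := by
  intro c hc
  unfold PySem.Int.toChars at hc
  rw [if_neg (by omega)] at hc
  exact pv_toDigitsCore_mem _ _ [] (by simp) c hc

-- the value int(c) of a digit character
lemma pv_dval_range (c : Char) (hc : c ∈ pvDigChars) :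
    0 ≤ (PySem.Int.ofChars? [c]).getD 0 ∧ (PySem.Int.ofChars? [c]).getD 0 < 10 := by
  fin_cases hc <;> decide

def pvStep (cnt : List Int) (d : Int) : List Int :=
  PySem.List.pySetD cnt d (PySem.List.pyGetD cnt d 0 + 1)

lemma pv_fold_count (ds : List Int) : ∀ cnt : List Int, cnt.length = 10 →
    (∀ d ∈ ds, 0 ≤ d ∧ d < 10) →
    (ds.foldl pvStep cnt).length = 10 ∧
      ∀ j : Nat, j < 10 → (ds.foldl pvStep cnt).getD j 0 = cnt.getD j 0 + ds.count (j : Int) := by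
  induction ds with
  | nil => intro cnt hlen _; simpa using hlen
  | cons d ds ih =>
    intro cnt hlen hmem
    obtain ⟨hd0, hd10⟩ := hmem d (by simp)
    have hset : pvStep cnt d = cnt.set d.toNat (PySem.List.pyGetD cnt d 0 + 1) := by
      unfold pvStep; exact PySem.List.pySetD_of_nonneg _ _ hd0
    have hlen' : (pvStep cnt d).length = 10 := by simp [hset, hlen]
    obtain ⟨hL, hC⟩ := ih (pvStep cnt d) hlen' (fun x hx => hmem x (by simp [hx]))
    refine ⟨by simpa using hL, ?_⟩
    intro j hj
    have hcnt := hC j hj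
    simp only [List.foldl_cons] at *
    rw [hcnt]
    have hdt : d.toNat < cnt.length := by omega
    have hget : PySem.List.pyGetD cnt d 0 = cnt.getD d.toNat 0 := by
      rw [PySem.List.pyGetD_eq_getElem cnt 0 hd0 (by omega)]
      rw [List.getD_eq_getElem cnt 0 hdt]
    by_cases hjd : j = d.toNat
    · have hdj : d = (j : Int) := by omega
      rw [hset, List.getD_eq_getElem _ 0 (by simpa [hlen] using hj)]
      simp only [hjd, List.getElem_set_self, hget]
      have hdd : ((d.toNat : Nat) : Int) = d := by omega
      rw [hdd]
      simp
      omega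
    · have hjlen : j < cnt.length := by omega
      rw [hset, List.getD_eq_getElem _ 0 (by simpa [hlen] using hj),
          List.getElem_set_ne (by omega), ← List.getD_eq_getElem cnt 0 hjlen]
      have hne : ¬ (d = (j : Int)) := by omega
      simp [hne]

lemma pv_zeros_getD (j : Nat) (h : j < 10) : (List.replicate 10 (0:Int)).getD j 0 = 0 := by
  interval_cases j <;> rfl

lemma pv_scan_iff (l : List Int) : interestingScan l = true ↔ ∀ i ∈ l, i ≤ 1 := by
  induction l with
  | nil => simp [interestingScan]
  | cons i rest ih =>
    simp only [interestingScan]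
    split_ifs with h
    · simp only [false_iff]
      intro hall
      exact absurd (hall i (by simp)) (by omega)
    · rw [ih]
      constructor
      · intro ha x hx
        rcases List.mem_cons.mp hx with rfl | hx
        · omega
        · exact ha x hx
      · intro ha x hx
        exact ha x (by simp [hx])

lemma pv_init_cnt : ((PySem.List.pyRange 0 10 1).map (fun _ => (0:Int))) = List.replicate 10 0 := by
  decide

-- characterisation of A as "all digit-value counts ≤ 1", i.e. Nodup
lemma pv_interesting_iff (n : Int) (hn : 0 ≤ n) :
    interesting n = true ↔
      ((PySem.Int.toChars n).map (fun c => (PySem.Int.ofChars? [c]).getD 0)).Nodup := by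
  unfold interesting
  set ds := (PySem.Int.toChars n).map (fun c => (PySem.Int.ofChars? [c]).getD 0) with hds
  have hrange : ∀ d ∈ ds, 0 ≤ d ∧ d < 10 := by
    intro d hd
    rw [hds] at hd
    obtain ⟨c, hc, rfl⟩ := List.mem_map.mp hd
    exact pv_dval_range c (pv_mem_toChars n hn c hc)
  have hfold : (PySem.Int.toChars n).foldl
      (fun cnt c =>
        let i := (PySem.Int.ofChars? [c]).getD 0
        PySem.List.pySetD cnt i (PySem.List.pyGetD cnt i 0 + 1))
      ((PySem.List.pyRange 0 10 1).map (fun _ => 0))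
      = ds.foldl pvStep (List.replicate 10 0) := by
    rw [hds, List.foldl_map, pv_init_cnt]; rfl
  simp only [hfold]
  obtain ⟨hL, hC⟩ := pv_fold_count ds (List.replicate 10 0) (by simp) hrange
  rw [pv_scan_iff]
  constructor
  · intro h
    rw [List.nodup_iff_count_le_one]
    intro v
    by_cases hv : v ∈ ds
    · obtain ⟨hv0, hv10⟩ := hrange v hv
      have hj : v.toNat < 10 := by omega
      have := hC v.toNat hj
      have hveq : ((v.toNat : Nat) : Int) = v := by omega
      rw [hveq] at this
      have hmem : (ds.foldl pvStep (List.replicate 10 0)).getD v.toNat 0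
          ∈ ds.foldl pvStep (List.replicate 10 0) := by
        rw [List.getD_eq_getElem _ 0 (by omega)]
        exact List.getElem_mem _
      have h2 := h _ hmem
      rw [hC v.toNat hj, hveq, pv_zeros_getD v.toNat hj] at h2
      omega
    · simp [List.count_eq_zero_of_not_mem hv]
  · intro hnd i hi
    have hnd' := List.nodup_iff_count_le_one.mp hnd
    obtain ⟨j, hj, rfl⟩ := List.mem_iff_getElem.mp hi
    have hj10 : j < 10 := by omega
    have := hC j hj10
    rw [← List.getD_eq_getElem _ 0 hj] at *
    rw [this, pv_zeros_getD j hj10]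
    have := hnd' (j : Int)
    omega

-- B side: adjacent all-ne over zip = Chain' (· ≠ ·)
lemma pv_adj_ne (l : List Int) :
    ((l.zip l.tail).all (fun p => p.1 != p.2)) = true ↔ l.IsChain (· ≠ ·) := by
  induction l with
  | nil => simp
  | cons a t ih =>
    cases t with
    | nil => simp
    | cons b t =>
      simp only [List.tail_cons, List.zip_cons_cons, List.all_cons, Bool.and_eq_true,
        bne_iff_ne, ne_eq, List.isChain_cons_cons]
      rw [← ih]
      simp

lemma pv_chain_lt (l : List Int) (h1 : l.IsChain (· ≤ ·)) (h2 : l.IsChain (· ≠ ·)) :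
    l.IsChain (· < ·) := by
  induction l with
  | nil => exact List.isChain_nil
  | cons a t ih =>
    cases t with
    | nil => simp
    | cons b t =>
      rw [List.isChain_cons_cons] at *
      exact ⟨lt_of_le_of_ne h1.1 h2.1, ih h1.2 h2.2⟩

-- characterisation of B as Nodup of the (unsorted) digit list
lemma pv_interesting_alt_iff (n : Int) :
    interesting_alt n = true ↔
      ((PySem.Int.toChars n).map (fun c => (PySem.Int.ofChars? [c]).getD 0)).Nodup := by
  unfold interesting_alt
  set ds := (PySem.Int.toChars n).map (fun c => (PySem.Int.ofChars? [c]).getD 0) with hds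
  set sds := PySem.List.sorted ds (fun x => x) false with hsds
  have hperm : sds.Perm ds := PySem.List.sorted_perm ds (fun x => x) false
  have hpw : sds.Pairwise (· ≤ ·) := PySem.List.sorted_pairwise ds (fun x => x)
  rw [pv_adj_ne]
  constructor
  · intro hch
    have hlt : sds.Pairwise (· < ·) :=
      (pv_chain_lt sds hpw.isChain hch).pairwise
    exact hperm.nodup_iff.mp (hlt.imp ne_of_lt)
  · intro hnd
    exact List.Pairwise.isChain (hperm.nodup_iff.mpr hnd)

-- ===== VERDICT (by name: the statement is the Claim_ definition above) =====
theorem interesting_spec : Claim_equal_interesting := by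
  intro n _ hpre
  unfold Spec_interesting
  rw [Bool.eq_iff_iff, pv_interesting_iff n hpre, pv_interesting_alt_iff n]
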